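-- pv_equiv track=rewrite | github.com/shuzeyfa/leetcode | E_2_Unforgivable_Curse_hard_version.py | can_transform
-- ===== SOURCE A (Python) =====
-- class UnionFind:
--     def __init__(self, n):
--         self.parent = list(range(n))
--
--     def find(self, x):
--         if self.parent[x] != x:
--             self.parent[x] = self.find(self.parent[x])  # Path compression
--         return self.parent[x]
--
--     def union(self, x, y):
--         fx, fy = self.find(x), self.find(y)
--         if fx != fy:
--             self.parent[fy] = fx  # Union
--
-- def can_transform(s, t, k):
--     n = len(s)
--     if len(s) != len(t):
--         return False
--
--     uf = UnionFind(n)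
--
--     # Step 1: Connect indices that can be swapped
--     for i in range(n):
--         if i + k < n:
--             uf.union(i, i + k)
--         if i + k + 1 < n:
--             uf.union(i, i + k + 1)
--
--     # Step 2: Group indices by their root parent
--     from collections import defaultdict, Counter
--
--     groups = defaultdict(list)
--     for i in range(n):
--         root = uf.find(i)
--         groups[root].append(i)
--
--     # Step 3: Check if s and t can be made equal in each group
--     for group_indices in groups.values():
--         s_chars = [s[i] for i in group_indices]
--         t_chars = [t[i] for i in group_indices]
--
--         if Counter(s_chars) != Counter(t_chars):
--             return False
--
--     return True
-- ===== SOURCE B (Python) =====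
-- from collections import Counter
--
--
-- def can_transform(s, t, k):
--     # An index i is "free" (its character can be moved anywhere among the free
--     # indices, since swap distances k and k+1 are available) iff i + k < n or
--     # i - k >= 0; all free indices form a single swap-connected group, so no
--     # union-find is needed: locked indices must match exactly, and the free
--     # characters of s and t must agree as multisets.
--     if len(s) != len(t):
--         return False
--     n = len(s)
--     free_s, free_t = [], []
--     for i in range(n):
--         if i + k < n or i - k >= 0:
--             free_s.append(s[i])
--             free_t.append(t[i])
--         elif s[i] != t[i]:
--             return False
--     return Counter(free_s) == Counter(free_t)
-- ===== Notes on version B (the rewrite author's own statement) =====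
-- stated objective: simpler
-- what changed: Replaced the union-find with path compression plus a root-grouping dict by a single pass that classifies each index as free (i+k<n or i-k>=0) or locked, using the fact that all free indices form one swap-connected group; locked indices are compared pointwise and the free characters as two Counters.
-- outside the precondition, e.g. on can_transform('ab', 'ba', -1): A returns True, B returns True; on can_transform('a', 'a', -2): A raises IndexError, B returns True
import Mathlib
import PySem

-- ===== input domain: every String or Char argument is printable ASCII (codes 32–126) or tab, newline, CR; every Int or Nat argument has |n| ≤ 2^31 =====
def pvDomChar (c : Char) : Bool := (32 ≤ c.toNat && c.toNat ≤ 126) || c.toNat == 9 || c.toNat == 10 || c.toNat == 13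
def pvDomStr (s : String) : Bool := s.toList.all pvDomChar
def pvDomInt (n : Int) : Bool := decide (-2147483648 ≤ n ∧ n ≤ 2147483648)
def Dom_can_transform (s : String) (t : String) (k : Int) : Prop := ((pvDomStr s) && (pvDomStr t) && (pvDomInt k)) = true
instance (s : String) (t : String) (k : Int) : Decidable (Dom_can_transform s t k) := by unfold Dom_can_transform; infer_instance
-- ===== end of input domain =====

-- B replaces A's union-find + root-grouping dict by one free/locked classification pass
-- (all free indices form a single swap group): simpler, no parent array. Pre_ restricts to
-- the natural domain k ≥ 0 (k is a swap distance); for k < 0 A raises IndexError or relies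
-- on Python's negative-index wraparound in the parent array.


-- ===== PORT A =====

-- Python dict equality (order-insensitive), used for Counter == Counter in both ports
def pyDictEq (d1 d2 : PySem.Dict Char Int) : Bool :=
  d1.size == d2.size && d1.items.all (fun p => d2.get? p.1 == some p.2)

-- UnionFind.find with path compression; fuel = len(parent) always suffices for the
-- inputs admitted by Pre_ (proved below); the fuel-0 and IndexError branches are unreachable there.
def ufFind : Nat → List Int → Int → List Int × Int
  | 0, parent, x => (parent, x)
  | fuel+1, parent, x =>
    match PySem.List.pyGet? parent x with
    | none => (parent, x)
    | some p =>
      if p ≠ x then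
        let r := ufFind fuel parent p
        (PySem.List.pySetD r.1 x r.2, r.2)
      else (parent, x)

-- UnionFind.union
def ufUnion (parent : List Int) (x y : Int) : List Int :=
  let r1 := ufFind parent.length parent x
  let r2 := ufFind r1.1.length r1.1 y
  if r1.2 ≠ r2.2 then PySem.List.pySetD r2.1 r2.2 r1.2 else r2.1

def can_transform (s : String) (t : String) (k : Int) : Bool :=
  let n := s.length
  if s.length ≠ t.length then false
  else
    -- uf = UnionFind(n)
    let parent0 : List Int := (List.range n).map Int.ofNat
    -- Step 1: connect indices
    let parent1 := (List.range n).foldl (fun parent (i : Nat) =>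
      let parent := if (i : Int) + k < (n : Int) then ufUnion parent (i : Int) ((i : Int) + k) else parent
      if (i : Int) + k + 1 < (n : Int) then ufUnion parent (i : Int) ((i : Int) + k + 1) else parent) parent0
    -- Step 2: group indices by root (find mutates parent, so thread it through)
    let st := (List.range n).foldl
      (fun (st : List Int × PySem.Dict Int (List Int)) (i : Nat) =>
        let r := ufFind st.1.length st.1 (i : Int)
        (r.1, st.2.modify r.2 [] (· ++ [(i : Int)])))
      (parent1, PySem.Dict.empty)
    -- Step 3: per-group Counter comparison ('return False' inside the loop = all)
    st.2.values.all (fun g =>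
      pyDictEq
        (PySem.Dict.counter (g.map (fun i => (PySem.Str.pyGet? s i).getD ' ')))   -- index always in range
        (PySem.Dict.counter (g.map (fun i => (PySem.Str.pyGet? t i).getD ' '))))

-- ===== PORT B =====
def can_transform_alt (s : String) (t : String) (k : Int) : Bool :=
  if s.length ≠ t.length then false
  else
    let n := s.length
    let sc := s.toList
    let tc := t.toList
    -- one pass: none = early 'return False' on a locked mismatch; otherwise collect free chars
    let st := (List.range n).foldl
      (fun (acc : Option (List Char × List Char)) (i : Nat) =>
        match acc with
        | none => none
        | some (fs, ft) =>
          if (i : Int) + k < (n : Int) ∨ (i : Int) - k ≥ 0 then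
            some (fs ++ [sc.getD i ' '], ft ++ [tc.getD i ' '])   -- index always in range
          else if sc.getD i ' ' ≠ tc.getD i ' ' then none
          else some (fs, ft))
      (some ([], []))
    match st with
    | none => false
    | some (fs, ft) => pyDictEq (PySem.Dict.counter fs) (PySem.Dict.counter ft)

-- ===== PRECONDITION & SPEC =====
-- Pre_ restricts to the task's natural domain k ≥ 0 (k is a swap distance): for k < -len(s)
-- A raises IndexError, and for -len(s) ≤ k < 0 A's value depends on Python's negative-index
-- wraparound in the parent array, an artefact of the implementation.
def Pre_can_transform (s : String) (t : String) (k : Int) : Prop := 0 ≤ k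
instance (s : String) (t : String) (k : Int) : Decidable (Pre_can_transform s t k) := by unfold Pre_can_transform; infer_instance

def pvWitness_can_transform : String × String × Int := ("abac", "caba", 2)

def Spec_can_transform (s : String) (t : String) (k : Int) (out : Bool) : Prop := out = can_transform_alt s t k
instance (s : String) (t : String) (k : Int) (out : Bool) : Decidable (Spec_can_transform s t k out) := by unfold Spec_can_transform; infer_instance

-- ===== CLAIM (what is proved, stated in full; the proofs are below) =====
def Claim_equal_can_transform : Prop := ∀ (s : String) (t : String) (k : Int), Dom_can_transform s t k → Pre_can_transform s t k → Spec_can_transform s t k (can_transform s t k)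

-- ===== LEMMAS AND PROOFS =====

-- ---- basic access helpers ----

def ufGet (p : List Int) (x : Int) : Int := (PySem.List.pyGet? p x).getD x

def ufInR (p : List Int) (x : Int) : Prop := 0 ≤ x ∧ x < (p.length : Int)

-- every entry in range points into range
def GoodP (p : List Int) : Prop := ∀ x : Int, ufInR p x → ufInR p (ufGet p x)

-- rank certificate: parent pointers strictly decrease d (acyclicity)
def RankedP (p : List Int) (d : Int → Nat) : Prop :=
  ∀ x : Int, ufInR p x → ufGet p x ≠ x → d (ufGet p x) < d x

abbrev isRootP (p : List Int) (x : Int) : Prop := ufGet p x = x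

-- pure iteration to the root (fuel m)
def itr : Nat → List Int → Int → Int
  | 0, _, x => x
  | m+1, p, x => if ufGet p x = x then x else itr m p (ufGet p x)

def ufRoot (p : List Int) (x : Int) : Int := itr p.length p x

theorem ufGet_in (p : List Int) (x : Int) (h0 : 0 ≤ x) (h1 : x < (p.length : Int)) :
    ufGet p x = p.getD x.toNat 0 := by
  rw [ufGet, PySem.List.pyGet?_eq_some_getElem p h0 h1,
    List.getD_eq_getElem p 0 (show x.toNat < p.length by omega)]
  rfl

theorem ufGet_pySetD_self (p : List Int) (x v : Int) (h0 : 0 ≤ x) (h1 : x < (p.length : Int)) :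
    ufGet (PySem.List.pySetD p x v) x = v := by
  rw [PySem.List.pySetD_of_nonneg p v h0]
  rw [ufGet_in _ _ h0 (by rw [List.length_set]; omega)]
  have hx : x.toNat < p.length := by omega
  rw [List.getD_eq_getElem _ 0 (by rw [List.length_set]; omega)]
  simp

theorem ufGet_pySetD_ne (p : List Int) (x v y : Int) (h0 : 0 ≤ x) (hy0 : 0 ≤ y) (hy : y ≠ x) :
    ufGet (PySem.List.pySetD p x v) y = ufGet p y := by
  rw [PySem.List.pySetD_of_nonneg p v h0]
  by_cases hyr : y < (p.length : Int)
  · rw [ufGet_in _ _ hy0 (by rw [List.length_set]; omega), ufGet_in _ _ hy0 hyr]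
    rw [List.getD_eq_getElem _ 0 (by rw [List.length_set]; omega),
      List.getD_eq_getElem _ 0 (by omega)]
    exact List.getElem_set_ne (by omega) _
  · have h1 : PySem.List.pyGet? (p.set x.toNat v) y = none := by
      rw [PySem.List.pyGet?_eq_none_iff, PySem.Raise.InRange, List.length_set]
      omega
    have h2 : PySem.List.pyGet? p y = none := by
      rw [PySem.List.pyGet?_eq_none_iff, PySem.Raise.InRange]
      omega
    rw [ufGet, ufGet, h1, h2]

-- ---- iteration lemmas ----

theorem itr_in (p : List Int) (hg : GoodP p) (x : Int) (hx : ufInR p x) :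
    ∀ m, ufInR p (itr m p x) := by
  intro m
  induction m generalizing x with
  | zero => exact hx
  | succ m ih =>
    rw [itr]
    split
    · exact hx
    · exact ih _ (hg x hx)

theorem itr_root (p : List Int) (x : Int) (hx : isRootP p x) : ∀ m, itr m p x = x := by
  intro m; cases m with
  | zero => rfl
  | succ m => rw [itr, if_pos hx]


theorem itr_add (p : List Int) : ∀ (m l : Nat) (x : Int), itr (m + l) p x = itr l p (itr m p x) := by
  intro m
  induction m with
  | zero => intro l x; rw [Nat.zero_add]; rfl
  | succ m ih =>
    intro l x
    by_cases hx : ufGet p x = x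
    · rw [itr_root p x hx, itr_root p x hx, itr_root p x hx]
    · have h1 : m + 1 + l = (m + l) + 1 := by omega
      rw [h1, itr, if_neg hx, itr, if_neg hx, ih]

theorem itr_absorb (p : List Int) (m l : Nat) (x : Int) (h : isRootP p (itr m p x)) :
    itr (m + l) p x = itr m p x := by
  rw [itr_add, itr_root _ _ h]

theorem itr_eq_of_le (p : List Int) (m f : Nat) (x : Int) (h : isRootP p (itr m p x))
    (hle : m ≤ f) : itr f p x = itr m p x := by
  have : f = m + (f - m) := by omega
  rw [this, itr_absorb _ _ _ _ h]

theorem d_itr_le (p : List Int) (d : Int → Nat) (hg : GoodP p) (hr : RankedP p d)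
    (x : Int) (hx : ufInR p x) : ∀ m, d (itr m p x) ≤ d x := by
  intro m
  induction m generalizing x with
  | zero => exact le_rfl
  | succ m ih =>
    rw [itr]
    split
    · exact le_rfl
    · rename_i hne
      exact le_trans (ih _ (hg x hx)) (le_of_lt (hr x hx hne))

-- pigeonhole: from any in-range node a root is reached in < length steps
theorem reach (p : List Int) (d : Int → Nat) (hg : GoodP p) (hr : RankedP p d)
    (x : Int) (hx : ufInR p x) : ∃ m, m < p.length ∧ isRootP p (itr m p x) := by
  by_contra hc
  push_neg at hc
  set n := p.length with hn
  have hnpos : 0 < n := by rcases hx with ⟨h1, h2⟩; omega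
  -- every step up to n strictly decreases d
  have hstep : ∀ m, m < n → d (itr (m + 1) p x) < d (itr m p x) := by
    intro m hm
    have hroot := hc m hm
    have hin := itr_in p hg x hx m
    have h1 : itr (m + 1) p x = itr 1 p (itr m p x) := itr_add p m 1 x
    rw [h1, itr, if_neg hroot]
    exact lt_of_le_of_lt (le_rfl) (hr _ hin hroot)
  have hmono : ∀ m₁ m₂, m₁ < m₂ → m₂ ≤ n → d (itr m₂ p x) < d (itr m₁ p x) := by
    intro m₁ m₂ hlt hle
    induction m₂ with
    | zero => omega
    | succ m₂ ih =>
      rcases Nat.lt_or_ge m₁ m₂ with h | h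
      · exact lt_trans (hstep m₂ (by omega)) (ih h (by omega))
      · have : m₁ = m₂ := by omega
        subst this
        exact hstep m₁ (by omega)
  -- the n+1 values itr 0 x, …, itr n x are distinct naturals < n: contradiction
  have hinj : Set.InjOn (fun m => (itr m p x).toNat) (Finset.range (n + 1)) := by
    intro m₁ hm₁ m₂ hm₂ heq
    simp only [Finset.coe_range, Set.mem_Iio] at hm₁ hm₂
    by_contra hne
    simp only at heq
    rcases Nat.lt_or_ge m₁ m₂ with h | h
    · have hd := hmono m₁ m₂ h (by omega)
      have hv₁ := itr_in p hg x hx m₁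
      have hv₂ := itr_in p hg x hx m₂
      have heq' : itr m₁ p x = itr m₂ p x := by
        rcases hv₁ with ⟨a1, a2⟩; rcases hv₂ with ⟨b1, b2⟩
        omega
      rw [heq'] at hd
      exact lt_irrefl _ hd
    · have h' : m₂ < m₁ := by omega
      have hd := hmono m₂ m₁ h' (by omega)
      have hv₁ := itr_in p hg x hx m₁
      have hv₂ := itr_in p hg x hx m₂
      have heq' : itr m₁ p x = itr m₂ p x := by
        rcases hv₁ with ⟨a1, a2⟩; rcases hv₂ with ⟨b1, b2⟩
        omega
      rw [heq'] at hd
      exact lt_irrefl _ hd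
  have hsub : (Finset.range (n + 1)).image (fun m => (itr m p x).toNat) ⊆ Finset.range n := by
    intro v hv
    simp only [Finset.mem_image, Finset.mem_range] at hv ⊢
    rcases hv with ⟨m, _, rfl⟩
    have := itr_in p hg x hx m
    rcases this with ⟨a1, a2⟩
    omega
  have h1 : ((Finset.range (n + 1)).image (fun m => (itr m p x).toNat)).card = n + 1 := by
    rw [Finset.card_image_of_injOn hinj, Finset.card_range]
  have h2 := Finset.card_le_card hsub
  rw [h1, Finset.card_range] at h2
  omega

-- ---- root lemmas ----

theorem ufInR_congr (p q : List Int) (h : p.length = q.length) (y : Int) :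
    ufInR p y ↔ ufInR q y := by simp [ufInR, h]

theorem root_isRoot (p : List Int) (d : Int → Nat) (hg : GoodP p) (hr : RankedP p d)
    (x : Int) (hx : ufInR p x) : isRootP p (ufRoot p x) := by
  obtain ⟨m, hm, hroot⟩ := reach p d hg hr x hx
  rw [ufRoot, itr_eq_of_le p m _ x hroot (by omega)]
  exact hroot

theorem root_fix (p : List Int) (x : Int) (hx : isRootP p x) : ufRoot p x = x :=
  itr_root p x hx _

theorem root_step (p : List Int) (d : Int → Nat) (hg : GoodP p) (hr : RankedP p d)
    (x : Int) (hx : ufInR p x) (hnr : ¬ isRootP p x) :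
    ufRoot p x = ufRoot p (ufGet p x) := by
  have hn : 0 < p.length := by rcases hx with ⟨h1, h2⟩; omega
  obtain ⟨m', hm', hroot'⟩ := reach p d hg hr (ufGet p x) (hg x hx)
  have h2 : itr 1 p x = ufGet p x := by
    show itr (0+1) p x = ufGet p x
    rw [itr, if_neg hnr]
    rfl
  have e1 : itr (1 + m') p x = itr m' p (ufGet p x) := by
    rw [itr_add, h2]
  have e2 : isRootP p (itr (1 + m') p x) := by rw [e1]; exact hroot'
  rw [ufRoot, itr_eq_of_le p (1 + m') _ x e2 (by omega), e1]
  exact (itr_eq_of_le p m' _ _ hroot' (by omega)).symm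

theorem root_in (p : List Int) (hg : GoodP p) (x : Int) (hx : ufInR p x) :
    ufInR p (ufRoot p x) := itr_in p hg x hx _

-- ---- path compression: setting parent[x] := root(x) preserves everything ----

theorem set_root (p : List Int) (d : Int → Nat) (hg : GoodP p) (hr : RankedP p d)
    (x r : Int) (hx : ufInR p x) (hrx : r = ufRoot p x) :
    GoodP (PySem.List.pySetD p x r) ∧ RankedP (PySem.List.pySetD p x r) d ∧
    (PySem.List.pySetD p x r).length = p.length ∧
    (∀ y, ufInR p y → ufRoot (PySem.List.pySetD p x r) y = ufRoot p y) := by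
  set p' := PySem.List.pySetD p x r with hp'
  have hlen : p'.length = p.length := PySem.List.length_pySetD p x r
  have hx0 : 0 ≤ x := hx.1
  have hrin : ufInR p r := hrx ▸ root_in p hg x hx
  have hrroot : isRootP p r := hrx ▸ root_isRoot p d hg hr x hx
  have hget : ∀ y, 0 ≤ y → y ≠ x → ufGet p' y = ufGet p y := fun y hy0 hyx =>
    ufGet_pySetD_ne p x r y hx0 hy0 hyx
  have hgetx : ufGet p' x = r := ufGet_pySetD_self p x r hx0 hx.2
  have hdr : ∀ (_ : ¬ isRootP p x), d r < d x := by
    intro hnr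
    rw [hrx, root_step p d hg hr x hx hnr]
    calc d (ufRoot p (ufGet p x)) ≤ d (ufGet p x) := d_itr_le p d hg hr _ (hg x hx) _
      _ < d x := hr x hx hnr
  have hgood : GoodP p' := by
    intro y hy
    rw [ufInR_congr p' p hlen] at hy ⊢
    by_cases hyx : y = x
    · subst hyx; rw [hgetx]; exact hrin
    · rw [hget y hy.1 hyx]; exact hg y hy
  have hrk : RankedP p' d := by
    intro y hy hne
    rw [ufInR_congr p' p hlen] at hy
    by_cases hyx : y = x
    · subst hyx
      rw [hgetx] at hne ⊢
      have hnr : ¬ isRootP p y := by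
        intro hroot
        exact hne (by rw [hrx, root_fix p y hroot])
      exact hdr hnr
    · rw [hget y hy.1 hyx] at hne ⊢
      exact hr y hy hne
  have hrootr' : isRootP p' r := by
    by_cases hrx' : r = x
    · show ufGet p' r = r
      rw [hrx', hgetx]
      exact hrx'
    · show ufGet p' r = r
      rw [hget r hrin.1 hrx']; exact hrroot
  refine ⟨hgood, hrk, hlen, ?_⟩
  have main : ∀ N y, ufInR p y → d y ≤ N → ufRoot p' y = ufRoot p y := by
    intro N
    induction N using Nat.strong_induction_on with
    | _ N ih =>
      intro y hy hdy
      by_cases hyx : y = x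
      · subst hyx
        by_cases hrxeq : r = y
        · have hroo : isRootP p' y := by show ufGet p' y = y; rw [hgetx, hrxeq]
          rw [root_fix p' y hroo]
          exact hrxeq ▸ hrx
        · have hnr' : ¬ isRootP p' y := by
            show ¬ ufGet p' y = y
            rw [hgetx]; exact fun h => hrxeq h
          rw [root_step p' d hgood hrk y ((ufInR_congr p' p hlen y).2 hy) hnr', hgetx,
            root_fix p' r hrootr', hrx]
      · by_cases hyroot : isRootP p y
        · have hroo : isRootP p' y := by show ufGet p' y = y; rw [hget y hy.1 hyx]; exact hyroot
          rw [root_fix p' y hroo, root_fix p y hyroot]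
        · have hnr' : ¬ isRootP p' y := by
            show ¬ ufGet p' y = y
            rw [hget y hy.1 hyx]; exact hyroot
          have hgy : ufInR p (ufGet p y) := hg y hy
          have hdgy : d (ufGet p y) < d y := hr y hy hyroot
          rw [root_step p' d hgood hrk y ((ufInR_congr p' p hlen y).2 hy) hnr',
            hget y hy.1 hyx,
            ih (d (ufGet p y)) (by omega) (ufGet p y) hgy le_rfl,
            ← root_step p d hg hr y hy hyroot]
  exact fun y hy => main (d y) y hy le_rfl

-- ---- find with path compression: full specification ----

theorem find_spec : ∀ (fuel : Nat) (p : List Int) (d : Int → Nat) (x : Int) (m : Nat),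
    GoodP p → RankedP p d → ufInR p x → isRootP p (itr m p x) → m < fuel →
    (ufFind fuel p x).2 = ufRoot p x ∧
    (ufFind fuel p x).1.length = p.length ∧
    GoodP (ufFind fuel p x).1 ∧ RankedP (ufFind fuel p x).1 d ∧
    (∀ y, ufInR p y → ufRoot (ufFind fuel p x).1 y = ufRoot p y) := by
  intro fuel
  induction fuel with
  | zero => intro p d x m hg hr hx hroot hm; omega
  | succ f ih =>
    intro p d x m hg hr hx hroot hm
    have hsome : PySem.List.pyGet? p x = some (ufGet p x) := by
      rw [PySem.List.pyGet?_eq_some_getElem p hx.1 hx.2]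
      rw [ufGet_in p x hx.1 hx.2, List.getD_eq_getElem p 0 (by rcases hx with ⟨a1, a2⟩; omega)]
    by_cases hne : ufGet p x = x
    · have hfi : ufFind (f+1) p x = (p, x) := by
        rw [ufFind, hsome]
        simp [hne]
      rw [hfi]
      exact ⟨(root_fix p x hne).symm, rfl, hg, hr, fun y _ => rfl⟩
    · have hred : ufFind (f+1) p x =
          (PySem.List.pySetD (ufFind f p (ufGet p x)).1 x (ufFind f p (ufGet p x)).2,
           (ufFind f p (ufGet p x)).2) := by
        rw [ufFind, hsome]
        simp [hne]
      have hm1 : 1 ≤ m := by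
        rcases Nat.eq_zero_or_pos m with h | h
        · exfalso; rw [h] at hroot; exact hne hroot
        · omega
      have hroot' : isRootP p (itr (m-1) p (ufGet p x)) := by
        have h2 : itr 1 p x = ufGet p x := by
          show itr (0+1) p x = ufGet p x
          rw [itr, if_neg hne]
          rfl
        have h1 : itr m p x = itr (m-1) p (ufGet p x) := by
          have h0 : m = 1 + (m-1) := by omega
          conv_lhs => rw [h0]
          rw [itr_add, h2]
        rw [← h1]; exact hroot
      have hgx : ufInR p (ufGet p x) := hg x hx
      obtain ⟨ih2, ihlen, ihg, ihr, ihroots⟩ := ih p d (ufGet p x) (m-1) hg hr hgx hroot' (by omega)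
      set p₁ := (ufFind f p (ufGet p x)).1 with hp₁
      set r := (ufFind f p (ufGet p x)).2 with hrdef
      have hxr : r = ufRoot p₁ x := by
        rw [ihroots x hx, ih2, root_step p d hg hr x hx hne]
      have hx₁ : ufInR p₁ x := (ufInR_congr p p₁ ihlen.symm x).1 hx
      obtain ⟨sg, sr, slen, sroots⟩ := set_root p₁ d ihg ihr x r hx₁ hxr
      rw [hred]
      refine ⟨?_, ?_, sg, sr, ?_⟩
      · rw [ih2, root_step p d hg hr x hx hne]
      · rw [slen, ihlen]
      · intro y hy
        rw [sroots y ((ufInR_congr p p₁ ihlen.symm y).1 hy), ihroots y hy]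

-- ---- union: merges the two classes, leaves the others ----

theorem union_spec (p : List Int) (d : Int → Nat) (hg : GoodP p) (hr : RankedP p d)
    (x y : Int) (hx : ufInR p x) (hy : ufInR p y) :
    (ufUnion p x y).length = p.length ∧ GoodP (ufUnion p x y) ∧
    (∃ d', RankedP (ufUnion p x y) d') ∧
    (∀ a, ufInR p a → ufRoot (ufUnion p x y) a =
      (if ufRoot p a = ufRoot p y ∧ ufRoot p x ≠ ufRoot p y then ufRoot p x else ufRoot p a)) := by
  obtain ⟨m₁, hm₁, hroot₁⟩ := reach p d hg hr x hx
  obtain ⟨F2_1, F1len, F1g, F1r, F1roots⟩ := find_spec p.length p d x m₁ hg hr hx hroot₁ hm₁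
  set p₁ := (ufFind p.length p x).1 with hp₁
  set fx := (ufFind p.length p x).2 with hfx
  have hy₁ : ufInR p₁ y := (ufInR_congr p p₁ F1len.symm y).1 hy
  obtain ⟨m₂, hm₂, hroot₂⟩ := reach p₁ d F1g F1r y hy₁
  obtain ⟨G2_1, G1len, G1g, G1r, G1roots⟩ := find_spec p₁.length p₁ d y m₂ F1g F1r hy₁ hroot₂ hm₂
  set p₂ := (ufFind p₁.length p₁ y).1 with hp₂
  set fy := (ufFind p₁.length p₁ y).2 with hfy
  have hlen₂ : p₂.length = p.length := by rw [G1len, F1len]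
  have hfx_eq : fx = ufRoot p x := F2_1
  have hfy_eq : fy = ufRoot p y := by rw [G2_1, F1roots y hy]
  have hroots₂ : ∀ a, ufInR p a → ufRoot p₂ a = ufRoot p a := by
    intro a ha
    rw [G1roots a ((ufInR_congr p p₁ F1len.symm a).1 ha), F1roots a ha]
  have hdef : ufUnion p x y = if fx ≠ fy then PySem.List.pySetD p₂ fy fx else p₂ := rfl
  by_cases hne : fx = fy
  · rw [hdef, if_neg (by simp [hne])]
    refine ⟨hlen₂, G1g, ⟨d, G1r⟩, ?_⟩
    intro a ha
    rw [hroots₂ a ha, if_neg]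
    rw [hfx_eq, hfy_eq] at hne
    simp [hne]
  · rw [hdef, if_pos hne]
    set p₃ := PySem.List.pySetD p₂ fy fx with hp₃
    have hlen₃ : p₃.length = p.length := by rw [hp₃, PySem.List.length_pySetD, hlen₂]
    have hfxin : ufInR p₂ fx := by
      rw [ufInR_congr p₂ p hlen₂, hfx_eq]
      exact root_in p hg x hx
    have hfyin : ufInR p₂ fy := by
      rw [ufInR_congr p₂ p hlen₂, hfy_eq]
      exact root_in p hg y hy
    have hfxroot : isRootP p₂ fx := by
      have h1 : ufRoot p₂ x = fx := by
        rw [hroots₂ x hx, hfx_eq]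
      rw [← h1]
      exact root_isRoot p₂ d G1g G1r x ((ufInR_congr p p₂ hlen₂.symm x).1 hx)
    have hfyroot : isRootP p₂ fy := by
      have h1 : ufRoot p₂ y = fy := by
        rw [hroots₂ y hy, hfy_eq]
      rw [← h1]
      exact root_isRoot p₂ d G1g G1r y ((ufInR_congr p p₂ hlen₂.symm y).1 hy)
    have hget₃ : ∀ a, 0 ≤ a → a ≠ fy → ufGet p₃ a = ufGet p₂ a := fun a h0 hfy' =>
      ufGet_pySetD_ne p₂ fy fx a hfyin.1 h0 hfy'
    have hget₃fy : ufGet p₃ fy = fx := ufGet_pySetD_self p₂ fy fx hfyin.1 hfyin.2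
    have hg₃ : GoodP p₃ := by
      intro a ha
      rw [ufInR_congr p₃ p₂ (by rw [hlen₃, hlen₂])] at ha ⊢
      by_cases hafy : a = fy
      · subst hafy; rw [hget₃fy]; exact hfxin
      · rw [hget₃ a ha.1 hafy]; exact G1g a ha
    set d' : Int → Nat := fun j => if ufRoot p₂ j = fy then d j + d fx + 1 else d j with hd'
    have hd'_of : ∀ j, ufRoot p₂ j = fy → d' j = d j + d fx + 1 := by
      intro j hj; simp only [hd', if_pos hj]
    have hd'_of_ne : ∀ j, ufRoot p₂ j ≠ fy → d' j = d j := by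
      intro j hj; simp only [hd', if_neg hj]
    have hfix_fy : ufRoot p₂ fy = fy := root_fix p₂ fy hfyroot
    have hfix_fx : ufRoot p₂ fx = fx := root_fix p₂ fx hfxroot
    have hr₃ : RankedP p₃ d' := by
      intro a ha hne'
      rw [ufInR_congr p₃ p₂ (by rw [hlen₃, hlen₂])] at ha
      by_cases hafy : a = fy
      · subst hafy
        rw [hget₃fy] at hne' ⊢
        rw [hd'_of fy hfix_fy, hd'_of_ne fx (by rw [hfix_fx]; exact fun h => hne h)]
        omega
      · rw [hget₃ a ha.1 hafy] at hne' ⊢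
        have hanr : ¬ isRootP p₂ a := hne'
        have e1 : ufRoot p₂ a = ufRoot p₂ (ufGet p₂ a) := root_step p₂ d G1g G1r a ha hanr
        have e2 := G1r a ha hne'
        by_cases hroa : ufRoot p₂ a = fy
        · rw [hd'_of a hroa, hd'_of (ufGet p₂ a) (by rw [← e1]; exact hroa)]
          omega
        · rw [hd'_of_ne a hroa, hd'_of_ne (ufGet p₂ a) (by rw [← e1]; exact hroa)]
          omega
    have main : ∀ N a, ufInR p₂ a → d a ≤ N →
        ufRoot p₃ a = if ufRoot p₂ a = fy then fx else ufRoot p₂ a := by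
      intro N
      induction N using Nat.strong_induction_on with
      | _ N ih =>
        intro a ha hda
        by_cases haroot : isRootP p₂ a
        · have hfixa : ufRoot p₂ a = a := root_fix p₂ a haroot
          by_cases hafy : a = fy
          · subst hafy
            have hnr₃ : ¬ isRootP p₃ fy := by
              show ¬ ufGet p₃ fy = fy
              rw [hget₃fy]; exact hne
            have ha₃ : ufInR p₃ fy := (ufInR_congr p₂ p₃ (by rw [hlen₃, hlen₂]) fy).1 ha
            rw [root_step p₃ d' hg₃ hr₃ fy ha₃ hnr₃, hget₃fy]
            have hfxroot₃ : isRootP p₃ fx := by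
              show ufGet p₃ fx = fx
              rw [hget₃ fx hfxin.1 (fun h => hne (h ▸ rfl))]
              exact hfxroot
            rw [root_fix p₃ fx hfxroot₃, if_pos hfixa]
          · have hroot₃ : isRootP p₃ a := by
              show ufGet p₃ a = a
              rw [hget₃ a ha.1 hafy]; exact haroot
            rw [root_fix p₃ a hroot₃, hfixa, if_neg hafy]
        · have hafy : a ≠ fy := by
            intro h; subst h; exact haroot hfyroot
          have hnr₃ : ¬ isRootP p₃ a := by
            show ¬ ufGet p₃ a = a
            rw [hget₃ a ha.1 hafy]; exact haroot
          have ha₃ : ufInR p₃ a := (ufInR_congr p₂ p₃ (by rw [hlen₃, hlen₂]) a).1 ha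
          have hga : ufInR p₂ (ufGet p₂ a) := G1g a ha
          have hdga : d (ufGet p₂ a) < d a := G1r a ha haroot
          rw [root_step p₃ d' hg₃ hr₃ a ha₃ hnr₃, hget₃ a ha.1 hafy,
            ih (d (ufGet p₂ a)) (by omega) (ufGet p₂ a) hga le_rfl,
            ← root_step p₂ d G1g G1r a ha haroot]
    refine ⟨hlen₃, hg₃, ⟨d', hr₃⟩, ?_⟩
    intro a ha
    have ha₂ : ufInR p₂ a := (ufInR_congr p p₂ hlen₂.symm a).1 ha
    rw [main (d a) a ha₂ le_rfl, hroots₂ a ha]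
    rw [hfx_eq, hfy_eq] at hne
    by_cases hcond : ufRoot p a = ufRoot p y
    · rw [if_pos (hfy_eq ▸ hcond), if_pos ⟨hcond, hne⟩, hfx_eq]
    · rw [if_neg (by rw [hfy_eq]; exact hcond), if_neg (by intro h; exact hcond h.1)]

-- ---- class structure through the union loop ----

-- the touched (= one swap-connected class) set after processing prefix [0, i)
def TmemI (n k i a : Int) : Prop :=
  (0 ≤ a ∧ a < min i (n - k)) ∨ (1 ≤ i ∧ k ≤ a ∧ a < min (i + k + 1) n)

-- invariant carried through the union loop: untouched indices are their own root,
-- all touched indices share one root ρ that is itself touched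
def InvP (n : Nat) (k : Int) (i : Nat) (p : List Int) : Prop :=
  p.length = n ∧ GoodP p ∧ (∃ d, RankedP p d) ∧
  ∃ ρ : Int,
    (∀ a : Int, ufInR p a → ¬ TmemI n k i a → ufRoot p a = a) ∧
    (∀ a : Int, ufInR p a → TmemI n k i a → ufRoot p a = ρ) ∧
    ((∃ a : Int, ufInR p a ∧ TmemI n k i a) → (TmemI n k i ρ ∧ ufInR p ρ))

-- the A-port's union-loop body
def ufBody (n : Nat) (k : Int) (parent : List Int) (i : Nat) : List Int :=
  let parent := if (i : Int) + k < (n : Int) then ufUnion parent (i : Int) ((i : Int) + k) else parent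
  if (i : Int) + k + 1 < (n : Int) then ufUnion parent (i : Int) ((i : Int) + k + 1) else parent

theorem init_root (n : Nat) (a : Int) (ha : 0 ≤ a) (hb : a < (n : Int)) :
    ufGet ((List.range n).map Int.ofNat) a = a := by
  have hlen : ((List.range n).map Int.ofNat).length = n := by simp
  rw [ufGet_in _ a ha (by rw [hlen]; exact hb)]
  rw [List.getD_eq_getElem _ 0 (by rw [hlen]; omega)]
  simp
  omega

theorem init_inv (n : Nat) (k : Int) : InvP n k 0 ((List.range n).map Int.ofNat) := by
  set p := (List.range n).map Int.ofNat with hp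
  have hlen : p.length = n := by simp [hp]
  have hroot : ∀ a : Int, ufInR p a → isRootP p a := by
    intro a ha
    exact init_root n a ha.1 (by rw [← hlen]; exact ha.2)
  refine ⟨hlen, ?_, ⟨fun _ => 0, ?_⟩, 0, ?_, ?_, ?_⟩
  · intro a ha
    rw [hroot a ha]; exact ha
  · intro a ha hne
    exact absurd (hroot a ha) hne
  · intro a ha _
    exact root_fix p a (hroot a ha)
  · intro a _ hT
    exfalso; unfold TmemI at hT; omega
  · rintro ⟨a, _, hT⟩
    exfalso; unfold TmemI at hT; omega

-- a union with both endpoints currently rooted as described keeps the invariant shape: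
-- generic single-merge step used twice in step_inv
theorem union_step (n : Nat) (k : Int) (p : List Int) (d : Int → Nat)
    (hlen : p.length = n) (hg : GoodP p) (hr : RankedP p d)
    (T : Int → Prop) (ρ : Int) (x y : Int) (hx : ufInR p x) (hy : ufInR p y)
    (hC1 : ∀ a : Int, ufInR p a → ¬ T a → ufRoot p a = a)
    (hC2 : ∀ a : Int, ufInR p a → T a → ufRoot p a = ρ)
    (hC3 : (∃ a : Int, ufInR p a ∧ T a) → (T ρ ∧ ufInR p ρ))
    (hTxy : T x ∨ T y ∨ (∀ a : Int, ¬ T a))  -- an endpoint is already touched, unless nothing is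
    : (ufUnion p x y).length = n ∧ GoodP (ufUnion p x y) ∧ (∃ d', RankedP (ufUnion p x y) d') ∧
      (∀ a : Int, ufInR p a → ¬ (T a ∨ a = x ∨ a = y) → ufRoot (ufUnion p x y) a = a) ∧
      (∀ a : Int, ufInR p a → (T a ∨ a = x ∨ a = y) → ufRoot (ufUnion p x y) a = ufRoot p x) ∧
      ((T (ufRoot p x) ∨ ufRoot p x = x) ∧ ufInR p (ufRoot p x)) := by
  obtain ⟨ulen, ug, urank, uroots⟩ := union_spec p d hg hr x y hx hy
  have hrx_in : ufInR p (ufRoot p x) := root_in p hg x hx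
  have hrx_val : T (ufRoot p x) ∨ ufRoot p x = x := by
    by_cases hTx : T x
    · left
      rw [hC2 x hx hTx]
      exact (hC3 ⟨x, hx, hTx⟩).1
    · right; exact hC1 x hx hTx
  refine ⟨by rw [ulen, hlen], ug, urank, ?_, ?_, hrx_val, hrx_in⟩
  · -- untouched, not an endpoint: root unchanged (= itself)
    intro a ha hna
    push_neg at hna
    obtain ⟨hnTa, hax, hay⟩ := hna
    have hra : ufRoot p a = a := hC1 a ha hnTa
    rw [uroots a ha]
    have hcond : ¬ (ufRoot p a = ufRoot p y ∧ ufRoot p x ≠ ufRoot p y) := by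
      rintro ⟨hc1, _⟩
      rw [hra] at hc1
      by_cases hTy' : T y
      · rw [hC2 y hy hTy'] at hc1
        have hρ := hC3 ⟨y, hy, hTy'⟩
        rw [hc1] at hnTa
        exact hnTa hρ.1
      · rw [hC1 y hy hTy'] at hc1
        exact hay hc1
    rw [if_neg hcond, hra]
  · -- touched or an endpoint: new root is root x
    intro a ha hTa
    rw [uroots a ha]
    by_cases hcnd : ufRoot p a = ufRoot p y ∧ ufRoot p x ≠ ufRoot p y
    · rw [if_pos hcnd]
    · rw [if_neg hcnd]
      have hfail : ufRoot p a ≠ ufRoot p y ∨ ufRoot p x = ufRoot p y := by tauto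
      rcases hTa with hTa | rfl | rfl
      · rcases hTxy with hTx | hTy' | hemp
        · rw [hC2 a ha hTa, hC2 x hx hTx]
        · have e1 := hC2 a ha hTa
          have e2 := hC2 y hy hTy'
          rcases hfail with hf | hf
          · exact absurd (e1.trans e2.symm) hf
          · rw [e1, ← e2]
            exact hf.symm
        · exact absurd hTa (hemp a)
      · rfl
      · rcases hfail with hf | hf
        · exact absurd rfl hf
        · exact hf.symm

-- membership step facts for the touched set (pure arithmetic)
theorem Tmem_step_both (n : Nat) (k : Int) (hk : 0 ≤ k) (i : Nat) (hi : i < n)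
    (h1 : (i : Int) + k < (n : Int)) (h2 : (i : Int) + k + 1 < (n : Int)) (a : Int) :
    TmemI n k (i + 1 : Nat) a ↔
      ((TmemI n k i a ∨ a = (i : Int) ∨ a = (i : Int) + k) ∨ a = (i : Int) + k + 1) := by
  unfold TmemI
  push_cast
  omega

theorem Tmem_step_one (n : Nat) (k : Int) (hk : 0 ≤ k) (i : Nat) (hi : i < n)
    (h1 : (i : Int) + k < (n : Int)) (h2 : ¬ ((i : Int) + k + 1 < (n : Int))) (a : Int) :
    TmemI n k (i + 1 : Nat) a ↔ (TmemI n k i a ∨ a = (i : Int) ∨ a = (i : Int) + k) := by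
  unfold TmemI
  push_cast
  omega

theorem Tmem_step_none (n : Nat) (k : Int) (hk : 0 ≤ k) (i : Nat) (hi : i < n)
    (h1 : ¬ ((i : Int) + k < (n : Int))) (a : Int) :
    TmemI n k (i + 1 : Nat) a ↔ TmemI n k i a := by
  unfold TmemI
  push_cast
  omega

theorem Tmem_y_touched (n : Nat) (k : Int) (hk : 0 ≤ k) (i : Nat) (hi : i < n)
    (h1 : (i : Int) + k < (n : Int)) :
    TmemI n k i ((i : Int) + k) ∨ (∀ a : Int, ¬ TmemI n k i a) := by
  by_cases h : 1 ≤ i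
  · left; unfold TmemI; push_cast; omega
  · right; intro a; unfold TmemI; omega

set_option maxHeartbeats 1000000 in
theorem step_inv (n : Nat) (k : Int) (hk : 0 ≤ k) (i : Nat) (hi : i < n) (p : List Int)
    (hinv : InvP n k i p) : InvP n k (i + 1) (ufBody n k p i) := by
  obtain ⟨hlen, hg, ⟨d, hr⟩, ρ, hC1, hC2, hC3⟩ := hinv
  have hiin : ufInR p (i : Int) := by constructor <;> [omega; (rw [hlen]; exact_mod_cast hi)]
  by_cases h1 : (i : Int) + k < (n : Int)
  · have hikin : ufInR p ((i : Int) + k) := by constructor <;> [omega; (rw [hlen]; exact_mod_cast h1)]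
    -- first union (i, i+k)
    obtain ⟨ulen, ug, ⟨d₁, ur⟩, uC1, uC2, uval, uin⟩ :=
      union_step n k p d hlen hg hr (TmemI n k i) ρ (i : Int) ((i : Int) + k) hiin hikin hC1 hC2 hC3
        ((Tmem_y_touched n k hk i hi h1).elim (fun h => Or.inr (Or.inl h)) (fun h => Or.inr (Or.inr h)))
    set p₁ := ufUnion p (i : Int) ((i : Int) + k) with hp₁
    set ρ₁ := ufRoot p (i : Int) with hρ₁
    have hinR₁ : ∀ a : Int, ufInR p₁ a ↔ ufInR p a := fun a =>
      ufInR_congr p₁ p (by omega) a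
    have hT₁C1 : ∀ a : Int, ufInR p₁ a → ¬ (TmemI n k i a ∨ a = (i:Int) ∨ a = (i:Int) + k) → ufRoot p₁ a = a := by
      intro a ha hna
      exact uC1 a ((hinR₁ a).1 ha) hna
    have hT₁C2 : ∀ a : Int, ufInR p₁ a → (TmemI n k i a ∨ a = (i:Int) ∨ a = (i:Int) + k) → ufRoot p₁ a = ρ₁ := by
      intro a ha hTa
      exact uC2 a ((hinR₁ a).1 ha) hTa
    have hT₁C3 : (∃ a : Int, ufInR p₁ a ∧ (TmemI n k i a ∨ a = (i:Int) ∨ a = (i:Int) + k)) →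
        ((TmemI n k i ρ₁ ∨ ρ₁ = (i:Int) ∨ ρ₁ = (i:Int) + k) ∧ ufInR p₁ ρ₁) := by
      intro _
      refine ⟨?_, (hinR₁ ρ₁).2 uin⟩
      rcases uval with h | h
      · exact Or.inl h
      · exact Or.inr (Or.inl h)
    by_cases h2 : (i : Int) + k + 1 < (n : Int)
    · -- second union (i, i+k+1)
      have hik1in : ufInR p₁ ((i : Int) + k + 1) := by
        rw [hinR₁]
        constructor <;> [omega; (rw [hlen]; exact_mod_cast h2)]
      have hiin₁ : ufInR p₁ (i : Int) := (hinR₁ _).2 hiin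
      obtain ⟨ulen₂, ug₂, hrank₂, vC1, vC2, vval, vin⟩ :=
        union_step n k p₁ d₁ (by omega) ug ur
          (fun a => TmemI n k i a ∨ a = (i:Int) ∨ a = (i:Int) + k) ρ₁
          (i : Int) ((i : Int) + k + 1) hiin₁ hik1in hT₁C1 hT₁C2 hT₁C3
          (Or.inl (Or.inr (Or.inl rfl)))
      have hbody : ufBody n k p i = ufUnion p₁ (i : Int) ((i : Int) + k + 1) := by
        rw [ufBody, if_pos h1, if_pos h2]
      rw [hbody]
      have hinR₂ : ∀ a : Int, ufInR (ufUnion p₁ (i:Int) ((i:Int)+k+1)) a ↔ ufInR p₁ a := fun a =>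
        ufInR_congr _ p₁ (by omega) a
      refine ⟨by omega, ug₂, hrank₂, ufRoot p₁ (i : Int), ?_, ?_, ?_⟩
      · intro a ha hna
        rw [Tmem_step_both n k hk i hi h1 h2] at hna
        refine vC1 a ((hinR₂ a).1 ha) ?_
        rintro (h | h | h)
        · exact hna (Or.inl h)
        · exact hna (Or.inl (Or.inr (Or.inl h)))
        · exact hna (Or.inr h)
      · intro a ha hTa
        rw [Tmem_step_both n k hk i hi h1 h2] at hTa
        refine vC2 a ((hinR₂ a).1 ha) ?_
        rcases hTa with h | h
        · exact Or.inl h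
        · exact Or.inr (Or.inr h)
      · intro _
        refine ⟨?_, (hinR₂ _).2 vin⟩
        rw [Tmem_step_both n k hk i hi h1 h2]
        rcases vval with h | h
        · exact Or.inl h
        · exact Or.inl (Or.inr (Or.inl h))
    · -- only the first union
      have hbody : ufBody n k p i = p₁ := by
        rw [ufBody, if_pos h1, if_neg h2]
      rw [hbody]
      refine ⟨by omega, ug, ⟨d₁, ur⟩, ρ₁, ?_, ?_, ?_⟩
      · intro a ha hna
        rw [Tmem_step_one n k hk i hi h1 h2] at hna
        exact hT₁C1 a ha hna
      · intro a ha hTa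
        rw [Tmem_step_one n k hk i hi h1 h2] at hTa
        exact hT₁C2 a ha hTa
      · intro hex
        obtain ⟨a, ha, hTa⟩ := hex
        rw [Tmem_step_one n k hk i hi h1 h2] at hTa
        obtain ⟨hv, hin⟩ := hT₁C3 ⟨a, ha, hTa⟩
        rw [Tmem_step_one n k hk i hi h1 h2]
        exact ⟨hv, hin⟩
  · -- no union
    have h2 : ¬ ((i : Int) + k + 1 < (n : Int)) := by omega
    have hbody : ufBody n k p i = p := by
      rw [ufBody, if_neg h1, if_neg h2]
    rw [hbody]
    refine ⟨hlen, hg, ⟨d, hr⟩, ρ, ?_, ?_, ?_⟩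
    · intro a ha hna
      rw [Tmem_step_none n k hk i hi h1] at hna
      exact hC1 a ha hna
    · intro a ha hTa
      rw [Tmem_step_none n k hk i hi h1] at hTa
      exact hC2 a ha hTa
    · intro hex
      obtain ⟨a, ha, hTa⟩ := hex
      rw [Tmem_step_none n k hk i hi h1] at hTa
      obtain ⟨hv, hin⟩ := hC3 ⟨a, ha, hTa⟩
      rw [Tmem_step_none n k hk i hi h1]
      exact ⟨hv, hin⟩

theorem loop_inv (n : Nat) (k : Int) (hk : 0 ≤ k) : ∀ (j : Nat), j ≤ n →
    InvP n k j ((List.range j).foldl (ufBody n k) ((List.range n).map Int.ofNat)) := by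
  intro j
  induction j with
  | zero => intro _; simpa using init_inv n k
  | succ j ih =>
    intro hj
    rw [List.range_succ, List.foldl_append]
    exact step_inv n k hk j (by omega) _ (ih (by omega))

-- ---- the touched set at the end of the loop is exactly the free set ----

theorem Tmem_final (n : Nat) (k : Int) (hk : 0 ≤ k) (a : Int) :
    TmemI n k (n : Int) a ↔ (0 ≤ a ∧ a < (n : Int) ∧ (a + k < (n : Int) ∨ k ≤ a)) := by
  unfold TmemI
  omega

-- ---- step 2 of A: grouping fold, with the parent threaded through find calls ----

theorem group_fold (R : Int → Int) (N : Nat) :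
    ∀ (l : List Nat) (p : List Int) (d : Int → Nat) (dict : PySem.Dict Int (List Int)),
    p.length = N → GoodP p → RankedP p d → (∀ j ∈ l, j < N) →
    (∀ y : Int, ufInR p y → ufRoot p y = R y) →
    (l.foldl (fun (st : List Int × PySem.Dict Int (List Int)) (i : Nat) =>
        let r := ufFind st.1.length st.1 (i : Int)
        (r.1, st.2.modify r.2 [] (· ++ [(i : Int)]))) (p, dict)).2
      = l.foldl (fun dd (i : Nat) => dd.modify (R (i : Int)) [] (· ++ [(i : Int)])) dict := by
  intro l
  induction l with
  | nil => intro p d dict _ _ _ _ _; rfl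
  | cons j l ih =>
    intro p d dict hlen hg hr hmem hR
    have hjin : ufInR p (j : Int) := by
      constructor
      · omega
      · rw [hlen]; exact_mod_cast hmem j (List.mem_cons_self)
    obtain ⟨m, hm, hroot⟩ := reach p d hg hr (j : Int) hjin
    obtain ⟨f2, flen, fg, fr, froots⟩ := find_spec p.length p d (j : Int) m hg hr hjin hroot hm
    rw [List.foldl_cons, List.foldl_cons]
    dsimp only
    rw [f2, hR (j : Int) hjin]
    exact ih (ufFind p.length p (j : Int)).1 d _ (by rw [flen, hlen]) fg fr
      (fun a ha => hmem a (List.mem_cons_of_mem _ ha))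
      (fun y hy => by
        rw [froots y ((ufInR_congr _ p (by rw [flen]) y).1 hy)]
        exact hR y ((ufInR_congr _ p (by rw [flen]) y).1 hy))

-- ---- Python Counter equality is multiset equality of the underlying lists ----

theorem counter_get? (xs : List Char) (c : Char) :
    (PySem.Dict.counter xs).get? c = if c ∈ xs then some ((xs.count c : Int)) else none := by
  by_cases hc : c ∈ xs
  · rw [if_pos hc]
    rw [(PySem.Dict.get?_eq_some_iff_mem_items _ _ _ (PySem.Dict.nodup_keys_counter xs))]
    rw [PySem.Dict.items_counter]
    exact List.mem_map.2 ⟨c, (PySem.Set.mem_ofList xs c).2 hc, rfl⟩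
  · rw [if_neg hc]
    rw [PySem.Dict.get?_eq_none_iff_not_mem_keys]
    rw [PySem.Dict.keys_counter]
    exact fun h => hc ((PySem.Set.mem_ofList xs c).1 h)

theorem counter_size (xs : List Char) :
    (PySem.Dict.counter xs).size = (PySem.Set.ofList xs).length := by
  show (PySem.Dict.counter xs).items.length = _
  rw [PySem.Dict.items_counter, List.length_map]

theorem pyDictEq_counter_iff (xs ys : List Char) :
    pyDictEq (PySem.Dict.counter xs) (PySem.Dict.counter ys) = true ↔
      ∀ c : Char, xs.count c = ys.count c := by
  rw [pyDictEq, Bool.and_eq_true, beq_iff_eq, List.all_eq_true]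
  constructor
  · rintro ⟨hsize, hall⟩ c
    by_cases hc : c ∈ xs
    · have hpair : ((c, (xs.count c : Int))) ∈ (PySem.Dict.counter xs).items := by
        rw [PySem.Dict.items_counter]
        exact List.mem_map.2 ⟨c, (PySem.Set.mem_ofList xs c).2 hc, rfl⟩
      have := hall _ hpair
      rw [beq_iff_eq, counter_get? ys c] at this
      by_cases hcy : c ∈ ys
      · rw [if_pos hcy] at this
        have := Option.some.inj this
        omega
      · rw [if_neg hcy] at this
        exact absurd this (by simp)
    · -- c in neither list: both counts are 0
      have hsub : (PySem.Set.ofList xs).toFinset ⊆ (PySem.Set.ofList ys).toFinset := by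
        intro a ha
        rw [List.mem_toFinset, PySem.Set.mem_ofList] at ha
        have hpair : ((a, (xs.count a : Int))) ∈ (PySem.Dict.counter xs).items := by
          rw [PySem.Dict.items_counter]
          exact List.mem_map.2 ⟨a, (PySem.Set.mem_ofList xs a).2 ha, rfl⟩
        have := hall _ hpair
        rw [beq_iff_eq, counter_get? ys a] at this
        rw [List.mem_toFinset, PySem.Set.mem_ofList]
        by_cases hay : a ∈ ys
        · exact hay
        · rw [if_neg hay] at this
          exact absurd this (by simp)
      have hcards : (PySem.Set.ofList ys).toFinset.card ≤ (PySem.Set.ofList xs).toFinset.card := by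
        rw [List.toFinset_card_of_nodup (PySem.Set.nodup_ofList xs),
          List.toFinset_card_of_nodup (PySem.Set.nodup_ofList ys)]
        rw [counter_size, counter_size] at hsize
        omega
      have hfeq := Finset.eq_of_subset_of_card_le hsub hcards
      have hcy : c ∉ ys := by
        intro hy
        apply hc
        have : c ∈ (PySem.Set.ofList ys).toFinset := by
          rw [List.mem_toFinset, PySem.Set.mem_ofList]; exact hy
        rw [← hfeq, List.mem_toFinset, PySem.Set.mem_ofList] at this
        exact this
      rw [List.count_eq_zero.2 hc, List.count_eq_zero.2 hcy]
  · intro h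
    have hmemiff : ∀ a : Char, a ∈ xs ↔ a ∈ ys := by
      intro a
      constructor
      · intro ha
        have := List.count_pos_iff.2 ha
        rw [h a] at this
        exact List.count_pos_iff.1 this
      · intro ha
        have := List.count_pos_iff.2 ha
        rw [← h a] at this
        exact List.count_pos_iff.1 this
    constructor
    · rw [counter_size, counter_size]
      have : (PySem.Set.ofList xs).toFinset = (PySem.Set.ofList ys).toFinset := by
        apply Finset.ext
        intro a
        rw [List.mem_toFinset, List.mem_toFinset, PySem.Set.mem_ofList, PySem.Set.mem_ofList]
        exact hmemiff a
      rw [← List.toFinset_card_of_nodup (PySem.Set.nodup_ofList xs),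
        ← List.toFinset_card_of_nodup (PySem.Set.nodup_ofList ys), this]
    · intro q hq
      rw [PySem.Dict.items_counter] at hq
      obtain ⟨a, hamem, rfl⟩ := List.mem_map.1 hq
      rw [beq_iff_eq, counter_get? ys a,
        if_pos ((hmemiff a).1 ((PySem.Set.mem_ofList xs a).1 hamem)), h a]

theorem pyDictEq_counter_singleton (c c' : Char) :
    pyDictEq (PySem.Dict.counter [c]) (PySem.Dict.counter [c']) = true ↔ c = c' := by
  rw [pyDictEq_counter_iff]
  constructor
  · intro h
    by_contra hcc
    have hc := h c
    simp [List.count_cons, List.count_nil] at hc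
    exact hcc hc.symm
  · rintro rfl _
    rfl

-- ---- characterization of B's single pass ----

theorem alt_fold_none (sc tc : List Char) (n : Nat) (k : Int) (l : List Nat) :
    List.foldl (fun (acc : Option (List Char × List Char)) (i : Nat) =>
      match acc with
      | none => none
      | some (fs, ft) =>
        if (i : Int) + k < (n : Int) ∨ (i : Int) - k ≥ 0 then
          some (fs ++ [sc.getD i ' '], ft ++ [tc.getD i ' '])
        else if sc.getD i ' ' ≠ tc.getD i ' ' then none
        else some (fs, ft)) none l = none := by
  induction l with
  | nil => rfl
  | cons j l ih => rw [List.foldl_cons]; exact ih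

theorem alt_fold_char (sc tc : List Char) (n : Nat) (k : Int) :
    ∀ (l : List Nat) (fs ft : List Char),
    List.foldl (fun (acc : Option (List Char × List Char)) (i : Nat) =>
      match acc with
      | none => none
      | some (fs, ft) =>
        if (i : Int) + k < (n : Int) ∨ (i : Int) - k ≥ 0 then
          some (fs ++ [sc.getD i ' '], ft ++ [tc.getD i ' '])
        else if sc.getD i ' ' ≠ tc.getD i ' ' then none
        else some (fs, ft)) (some (fs, ft)) l
    = if ∃ j ∈ l, ¬ ((j : Int) + k < (n : Int) ∨ (j : Int) - k ≥ 0) ∧ sc.getD j ' ' ≠ tc.getD j ' '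
      then none
      else some
        (fs ++ (l.filter (fun (j : Nat) => decide ((j : Int) + k < (n : Int) ∨ (j : Int) - k ≥ 0))).map (fun j => sc.getD j ' '),
         ft ++ (l.filter (fun (j : Nat) => decide ((j : Int) + k < (n : Int) ∨ (j : Int) - k ≥ 0))).map (fun j => tc.getD j ' ')) := by
  intro l
  induction l with
  | nil =>
    intro fs ft
    rw [if_neg (by rintro ⟨j, hj, _⟩; exact absurd hj (List.not_mem_nil))]
    simp
  | cons j l ih =>
    intro fs ft
    rw [List.foldl_cons]
    by_cases hfree : (j : Int) + k < (n : Int) ∨ (j : Int) - k ≥ 0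
    · have hstep : (match some (fs, ft) with
          | none => none
          | some (fs, ft) =>
            if (j : Int) + k < (n : Int) ∨ (j : Int) - k ≥ 0 then
              some (fs ++ [sc.getD j ' '], ft ++ [tc.getD j ' '])
            else if sc.getD j ' ' ≠ tc.getD j ' ' then none
            else some (fs, ft)) = some (fs ++ [sc.getD j ' '], ft ++ [tc.getD j ' ']) := by
        show (if (j : Int) + k < (n : Int) ∨ (j : Int) - k ≥ 0 then
            some (fs ++ [sc.getD j ' '], ft ++ [tc.getD j ' '])
          else if sc.getD j ' ' ≠ tc.getD j ' ' then none else some (fs, ft)) = _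
        rw [if_pos hfree]
      rw [hstep, ih]
      have hex : (∃ j' ∈ j :: l, ¬ ((j' : Int) + k < (n : Int) ∨ (j' : Int) - k ≥ 0) ∧ sc.getD j' ' ' ≠ tc.getD j' ' ') ↔
          (∃ j' ∈ l, ¬ ((j' : Int) + k < (n : Int) ∨ (j' : Int) - k ≥ 0) ∧ sc.getD j' ' ' ≠ tc.getD j' ' ') := by
        constructor
        · rintro ⟨j', hj', hcond⟩
          rcases List.mem_cons.1 hj' with rfl | hj'
          · exact absurd hfree hcond.1
          · exact ⟨j', hj', hcond⟩
        · rintro ⟨j', hj', hcond⟩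
          exact ⟨j', List.mem_cons_of_mem _ hj', hcond⟩
      by_cases hx : ∃ j' ∈ l, ¬ ((j' : Int) + k < (n : Int) ∨ (j' : Int) - k ≥ 0) ∧ sc.getD j' ' ' ≠ tc.getD j' ' '
      · rw [if_pos hx, if_pos (hex.2 hx)]
      · rw [if_neg hx, if_neg (fun h => hx (hex.1 h))]
        rw [List.filter_cons_of_pos (by exact decide_eq_true hfree)]
        simp [List.append_assoc]
    · by_cases hmis : sc.getD j ' ' ≠ tc.getD j ' '
      · have hstep : (match some (fs, ft) with
            | none => none
            | some (fs, ft) =>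
              if (j : Int) + k < (n : Int) ∨ (j : Int) - k ≥ 0 then
                some (fs ++ [sc.getD j ' '], ft ++ [tc.getD j ' '])
              else if sc.getD j ' ' ≠ tc.getD j ' ' then none
              else some (fs, ft)) = none := by
          show (if (j : Int) + k < (n : Int) ∨ (j : Int) - k ≥ 0 then
              some (fs ++ [sc.getD j ' '], ft ++ [tc.getD j ' '])
            else if sc.getD j ' ' ≠ tc.getD j ' ' then none else some (fs, ft)) = _
          rw [if_neg hfree, if_pos hmis]
        rw [hstep, alt_fold_none]
        rw [if_pos ⟨j, List.mem_cons_self, hfree, hmis⟩]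
      · have hstep : (match some (fs, ft) with
            | none => none
            | some (fs, ft) =>
              if (j : Int) + k < (n : Int) ∨ (j : Int) - k ≥ 0 then
                some (fs ++ [sc.getD j ' '], ft ++ [tc.getD j ' '])
              else if sc.getD j ' ' ≠ tc.getD j ' ' then none
              else some (fs, ft)) = some (fs, ft) := by
          show (if (j : Int) + k < (n : Int) ∨ (j : Int) - k ≥ 0 then
              some (fs ++ [sc.getD j ' '], ft ++ [tc.getD j ' '])
            else if sc.getD j ' ' ≠ tc.getD j ' ' then none else some (fs, ft)) = _
          rw [if_neg hfree, if_neg hmis]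
        rw [hstep, ih]
        have hex : (∃ j' ∈ j :: l, ¬ ((j' : Int) + k < (n : Int) ∨ (j' : Int) - k ≥ 0) ∧ sc.getD j' ' ' ≠ tc.getD j' ' ') ↔
            (∃ j' ∈ l, ¬ ((j' : Int) + k < (n : Int) ∨ (j' : Int) - k ≥ 0) ∧ sc.getD j' ' ' ≠ tc.getD j' ' ') := by
          constructor
          · rintro ⟨j', hj', hcond⟩
            rcases List.mem_cons.1 hj' with rfl | hj'
            · exact absurd hcond.2 hmis
            · exact ⟨j', hj', hcond⟩
          · rintro ⟨j', hj', hcond⟩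
            exact ⟨j', List.mem_cons_of_mem _ hj', hcond⟩
        by_cases hx : ∃ j' ∈ l, ¬ ((j' : Int) + k < (n : Int) ∨ (j' : Int) - k ≥ 0) ∧ sc.getD j' ' ' ≠ tc.getD j' ' '
        · rw [if_pos hx, if_pos (hex.2 hx)]
        · rw [if_neg hx, if_neg (fun h => hx (hex.1 h))]
          have hf := List.filter_cons_of_neg
            (p := fun (j : Nat) => decide ((j : Int) + k < (n : Int) ∨ (j : Int) - k ≥ 0))
            (l := l) (a := j) (fun h => hfree (of_decide_eq_true h))
          rw [hf]

-- ---- final assembly ----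

theorem char_conv (u : String) (j : Nat) :
    ((PySem.Str.pyGet? u (j : Int)).getD ' ') = u.toList.getD j ' ' := by
  rw [PySem.Str.pyGet?_natCast, List.getD_eq_getElem?_getD]

set_option maxHeartbeats 2000000 in
theorem main_eq (s t : String) (k : Int) (hk : 0 ≤ k) :
    can_transform s t k = can_transform_alt s t k := by
  by_cases hl : s.length = t.length
  · unfold can_transform can_transform_alt
    dsimp only
    rw [if_neg (fun h => h hl), if_neg (fun h => h hl)]
    -- the union loop body is ufBody
    have hfoldeq : (List.range s.length).foldl (fun parent (i : Nat) =>
        let parent := if (i : Int) + k < (s.length : Int) then ufUnion parent (i : Int) ((i : Int) + k) else parent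
        if (i : Int) + k + 1 < (s.length : Int) then ufUnion parent (i : Int) ((i : Int) + k + 1) else parent)
        ((List.range s.length).map Int.ofNat)
        = (List.range s.length).foldl (ufBody s.length k) ((List.range s.length).map Int.ofNat) := rfl
    rw [hfoldeq]
    obtain ⟨Plen, Pg, ⟨d, Pr⟩, ρ, C1, C2, C3⟩ := loop_inv s.length k hk s.length le_rfl
    set P := (List.range s.length).foldl (ufBody s.length k) ((List.range s.length).map Int.ofNat) with hP
    -- grouping fold becomes a plain dict fold keyed by the root function
    rw [group_fold (fun a => ufRoot P a) s.length (List.range s.length) P d PySem.Dict.empty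
      Plen Pg Pr (fun j hj => List.mem_range.1 hj) (fun y _ => rfl)]
    set G := (List.range s.length).foldl
      (fun dd (i : Nat) => dd.modify (ufRoot P (i : Int)) [] (· ++ [(i : Int)])) PySem.Dict.empty with hG
    have hkeysnodup : G.keys.Nodup :=
      PySem.Dict.nodup_keys_foldl_modify_key _ _ _ _ _ PySem.Dict.nodup_keys_empty
    have hkeys : G.keys = PySem.Set.ofList ((List.range s.length).map (fun i : Nat => ufRoot P (i : Int))) := by
      rw [hG, PySem.Dict.keys_foldl_modify_key, PySem.Dict.keys_empty, PySem.Set.update_nil_left]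
    rw [PySem.Dict.values_eq_map_keys G hkeysnodup [], List.all_map]
    have hgetD : ∀ c : Int, G.getD c [] =
        ((List.range s.length).filter (fun i : Nat => ufRoot P (i : Int) == c)).map (fun i : Nat => (i : Int)) := by
      intro c
      have hG2 : G = ((List.range s.length).map (fun i : Nat => (ufRoot P (i : Int), (i : Int)))).foldl
          (fun dd q => dd.modify q.1 [] (· ++ [q.2])) PySem.Dict.empty := by
        rw [List.foldl_map]
      rw [hG2, PySem.Dict.getD_foldl_modify_append, PySem.Dict.getD_empty, List.nil_append, List.filter_map, List.map_map]
      rfl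
    -- abbreviations for the free predicate and invariant facts at the Nat level
    have hfree_iff : ∀ a : Int, 0 ≤ a → a < (s.length : Int) →
        (TmemI s.length k (s.length : Int) a ↔ (a + k < (s.length : Int) ∨ k ≤ a)) := by
      intro a h0 h1
      rw [Tmem_final s.length k hk a]
      constructor
      · rintro ⟨_, _, h⟩; exact h
      · intro h; exact ⟨h0, h1, h⟩
    have hinR : ∀ j : Nat, j < s.length → ufInR P (j : Int) := by
      intro j hj
      exact ⟨by omega, by rw [Plen]; exact_mod_cast hj⟩
    have C1' : ∀ j : Nat, j < s.length → ¬ ((j : Int) + k < (s.length : Int) ∨ k ≤ (j : Int)) →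
        ufRoot P (j : Int) = (j : Int) := by
      intro j hj hnf
      refine C1 (j : Int) (hinR j hj) ?_
      rw [hfree_iff (j : Int) (by omega) (by exact_mod_cast hj)]
      exact hnf
    have C2' : ∀ j : Nat, j < s.length → ((j : Int) + k < (s.length : Int) ∨ k ≤ (j : Int)) →
        ufRoot P (j : Int) = ρ := by
      intro j hj hf
      refine C2 (j : Int) (hinR j hj) ?_
      rw [hfree_iff (j : Int) (by omega) (by exact_mod_cast hj)]
      exact hf
    have Cρ : (∃ j : Nat, j < s.length ∧ ((j : Int) + k < (s.length : Int) ∨ k ≤ (j : Int))) →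
        ((ρ + k < (s.length : Int) ∨ k ≤ ρ) ∧ 0 ≤ ρ ∧ ρ < (s.length : Int)) := by
      rintro ⟨j, hj, hf⟩
      have := C3 ⟨(j : Int), hinR j hj, by
        rw [hfree_iff (j : Int) (by omega) (by exact_mod_cast hj)]; exact hf⟩
      obtain ⟨hT, hin⟩ := this
      have h1 : 0 ≤ ρ := hin.1
      have h2 : ρ < (s.length : Int) := by
        have h := hin.2
        rw [Plen] at h
        exact h
      rw [hfree_iff ρ h1 h2] at hT
      exact ⟨hT, h1, h2⟩
    -- the singleton group of a locked index
    have hsingle : ∀ j : Nat, j < s.length → ¬ ((j : Int) + k < (s.length : Int) ∨ k ≤ (j : Int)) →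
        (List.range s.length).filter (fun i : Nat => ufRoot P (i : Int) == ufRoot P (j : Int)) = [j] := by
      intro j hj hnf
      have hpred : ∀ i ∈ List.range s.length,
          (ufRoot P (i : Int) == ufRoot P (j : Int)) = (i == j) := by
        intro i hi
        have hi' := List.mem_range.1 hi
        rw [Bool.eq_iff_iff, beq_iff_eq, beq_iff_eq]
        constructor
        · intro hr
          by_cases hfi : (i : Int) + k < (s.length : Int) ∨ k ≤ (i : Int)
          · exfalso
            rw [C2' i hi' hfi, C1' j hj hnf] at hr
            have hρ := Cρ ⟨i, hi', hfi⟩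
            rw [hr] at hρ
            exact hnf hρ.1
          · rw [C1' i hi' hfi, C1' j hj hnf] at hr
            exact_mod_cast hr
        · rintro rfl; rfl
      rw [List.filter_congr hpred, List.filter_beq,
        List.count_eq_one_of_mem (List.nodup_range) (List.mem_range.2 hj), List.replicate_one]
    -- the free group is the whole free set
    have hfreegroup : (∃ j : Nat, j < s.length ∧ ((j : Int) + k < (s.length : Int) ∨ k ≤ (j : Int))) →
        (List.range s.length).filter (fun i : Nat => ufRoot P (i : Int) == ρ) =
        (List.range s.length).filter (fun i : Nat => decide ((i : Int) + k < (s.length : Int) ∨ (i : Int) - k ≥ 0)) := by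
      intro hex
      refine List.filter_congr ?_
      intro i hi
      have hi' := List.mem_range.1 hi
      rw [Bool.eq_iff_iff, beq_iff_eq, decide_eq_true_iff]
      constructor
      · intro hr
        by_cases hfi : (i : Int) + k < (s.length : Int) ∨ k ≤ (i : Int)
        · rcases hfi with h | h
          · exact Or.inl h
          · right; omega
        · exfalso
          rw [C1' i hi' hfi] at hr
          have hρ := Cρ hex
          rw [← hr] at hρ
          exact hfi hρ.1
      · intro hfi
        exact C2' i hi' (by omega)
    -- rewrite B's fold
    rw [alt_fold_char s.toList t.toList s.length k (List.range s.length) [] []]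
    by_cases hbad : ∃ j ∈ List.range s.length,
        ¬ ((j : Int) + k < (s.length : Int) ∨ (j : Int) - k ≥ 0) ∧ s.toList.getD j ' ' ≠ t.toList.getD j ' '
    · -- a locked mismatch: both sides are false
      rw [if_pos hbad]
      obtain ⟨j, hjmem, hnf, hmis⟩ := hbad
      have hj := List.mem_range.1 hjmem
      have hnf' : ¬ ((j : Int) + k < (s.length : Int) ∨ k ≤ (j : Int)) := by omega
      rw [Bool.eq_false_iff]
      intro hA
      have hmemr : ufRoot P (j : Int) ∈ G.keys := by
        rw [hkeys]
        exact (PySem.Set.mem_ofList _ _).2 (List.mem_map.2 ⟨j, hjmem, rfl⟩)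
      have hthis := (List.all_eq_true.1 hA) _ hmemr
      simp only [Function.comp] at hthis
      rw [hgetD, hsingle j hj hnf', List.map_map, List.map_map] at hthis
      simp only [List.map_cons, List.map_nil, Function.comp] at hthis
      rw [char_conv s j, char_conv t j] at hthis
      rw [pyDictEq_counter_singleton] at hthis
      exact hmis hthis
    · -- no locked mismatch: both sides equal the free-Counter comparison
      rw [if_neg hbad]
      show _ = _
      rw [List.nil_append, List.nil_append]
      rw [Bool.eq_iff_iff, List.all_eq_true]
      constructor
      · intro hall
        by_cases hex : ∃ j : Nat, j < s.length ∧ ((j : Int) + k < (s.length : Int) ∨ k ≤ (j : Int))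
        · obtain ⟨j0, hj0, hf0⟩ := hex
          have hmemr : ufRoot P (j0 : Int) ∈ G.keys := by
            rw [hkeys]
            exact (PySem.Set.mem_ofList _ _).2 (List.mem_map.2 ⟨j0, List.mem_range.2 hj0, rfl⟩)
          have := hall _ hmemr
          simp only [Function.comp] at this
          rw [hgetD, C2' j0 hj0 hf0, hfreegroup ⟨j0, hj0, hf0⟩, List.map_map, List.map_map] at this
          have hmap : ∀ u : String,
              (List.map ((fun i : Int => (PySem.Str.pyGet? u i).getD ' ') ∘ (fun i : Nat => (i : Int)))
                ((List.range s.length).filter (fun i : Nat => decide ((i : Int) + k < (s.length : Int) ∨ (i : Int) - k ≥ 0))))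
              = (List.map (fun j => u.toList.getD j ' ')
                ((List.range s.length).filter (fun i : Nat => decide ((i : Int) + k < (s.length : Int) ∨ (i : Int) - k ≥ 0)))) := by
            intro u
            refine List.map_congr_left ?_
            intro a _
            exact char_conv u a
          rw [hmap s, hmap t] at this
          exact this
        · -- no free index at all: both char lists are empty
          have hnilfilter : (List.range s.length).filter
              (fun i : Nat => decide ((i : Int) + k < (s.length : Int) ∨ (i : Int) - k ≥ 0)) = [] := by
            rw [List.filter_eq_nil_iff]
            intro a ha h
            have ha' := List.mem_range.1 ha
            have := of_decide_eq_true h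
            exact hex ⟨a, ha', by omega⟩
          rw [hnilfilter]
          simp only [List.map_nil]
          rw [pyDictEq_counter_iff]
          intro c; rfl
      · intro hfc r hr
        rw [hkeys] at hr
        obtain ⟨j, hjmem, rfl⟩ := List.mem_map.1 ((PySem.Set.mem_ofList _ _).1 hr)
        have hj := List.mem_range.1 hjmem
        simp only [Function.comp]
        by_cases hfj : (j : Int) + k < (s.length : Int) ∨ k ≤ (j : Int)
        · rw [hgetD, C2' j hj hfj, hfreegroup ⟨j, hj, hfj⟩, List.map_map, List.map_map]
          have hmap : ∀ u : String,
              (List.map ((fun i : Int => (PySem.Str.pyGet? u i).getD ' ') ∘ (fun i : Nat => (i : Int)))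
                ((List.range s.length).filter (fun i : Nat => decide ((i : Int) + k < (s.length : Int) ∨ (i : Int) - k ≥ 0))))
              = (List.map (fun j => u.toList.getD j ' ')
                ((List.range s.length).filter (fun i : Nat => decide ((i : Int) + k < (s.length : Int) ∨ (i : Int) - k ≥ 0)))) := by
            intro u
            refine List.map_congr_left ?_
            intro a _
            exact char_conv u a
          rw [hmap s, hmap t]
          exact hfc
        · rw [hgetD, hsingle j hj hfj, List.map_map, List.map_map]
          simp only [List.map_cons, List.map_nil, Function.comp]
          rw [char_conv s j, char_conv t j]
          rw [pyDictEq_counter_singleton]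
          by_contra hne
          exact hbad ⟨j, hjmem, by omega, hne⟩
  · -- length mismatch: both sides are false
    unfold can_transform can_transform_alt
    dsimp only
    rw [if_pos hl, if_pos hl]

-- ===== VERDICT (by name: the statement is the Claim_ definition above) =====
theorem can_transform_spec : Claim_equal_can_transform := by
  intro s t k _ hpre
  unfold Spec_can_transform
  exact main_eq s t k hpre
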